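-- pv_equiv track=rewrite | github.com/SausageTaste/Little-Ruler | DalbaragiUtils/dalutils/util/path.py | stepInsidePath
-- ===== SOURCE A (Python) =====
-- from typing import Tuple, List, Generator
--
-- def splitAll(path: str) -> List[str]:
--     return path.replace('\\', '/').split('/')
--
-- def stepInsidePath(path: str) -> Generator[str, None, None]:
--     pathList = splitAll(path)
--     if len(pathList) <= 1:
--         yield path
--         return
--
--     pathAccum = ""
--     if pathList[0].endswith(':'):
--         pathAccum += pathList[0]
--         pathList = pathList[1:]
--
--     for fol in pathList:
--         pathAccum += fol + '/'
--         yield pathAccum[:-1]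
-- ===== SOURCE B (Python) =====
-- def splitAll(path):
--     return path.replace('\\', '/').split('/')
--
-- def stepInsidePath(path):
--     parts = splitAll(path)
--     if len(parts) <= 1:
--         yield path
--         return
--     drive = ''
--     if parts[0].endswith(':'):
--         drive = parts[0]
--         parts = parts[1:]
--     for i in range(len(parts)):
--         yield drive + '/'.join(parts[:i + 1])
-- ===== Notes on version B (the rewrite author's own statement) =====
-- stated objective: simpler
-- what changed: Instead of growing a mutable accumulator string by appending each folder plus a separator and trimming the trailing separator before each yield, B peels the drive once and yields each prefix statelessly by joining a slice of the parts list.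
import Mathlib
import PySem

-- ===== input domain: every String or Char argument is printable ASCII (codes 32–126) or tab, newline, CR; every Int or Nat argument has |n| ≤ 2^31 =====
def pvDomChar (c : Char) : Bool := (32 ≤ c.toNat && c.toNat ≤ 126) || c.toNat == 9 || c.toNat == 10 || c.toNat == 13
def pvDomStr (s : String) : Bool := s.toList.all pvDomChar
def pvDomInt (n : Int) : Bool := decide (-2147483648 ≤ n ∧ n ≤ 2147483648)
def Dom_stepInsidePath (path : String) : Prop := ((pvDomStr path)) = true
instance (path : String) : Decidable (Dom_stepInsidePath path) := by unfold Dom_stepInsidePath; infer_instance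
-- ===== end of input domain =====

-- B replaces A's mutable accumulator-then-trim ('accum += fol + "/"; yield accum[:-1]') with
-- stateless slice-joins 'drive + "/".join(parts[:i+1])'; objective: simpler (no speed claim).

-- ===== PORT A =====
-- splitAll: path.replace('\\','/').split('/')  ('/' is a nonempty separator, so split? always returns some)
def splitAll (path : String) : List String :=
  (PySem.Str.split? (PySem.Str.replace path "\\" "/") "/").getD []

def stepInsidePath (path : String) : List String :=
  let pathList := splitAll path
  if pathList.length ≤ 1 then [path]
  else
    -- pathList[0]: split results are never empty, so headI is Python's pathList[0] here
    let st0 : String × List String :=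
      if PySem.Str.endswith pathList.headI ":" then (pathList.headI, pathList.tail)
      else ("", pathList)
    (st0.2.foldl (fun (st : String × List String) fol =>
        let acc := st.1 ++ fol ++ "/"
        (acc, st.2 ++ [PySem.Str.slice acc none (some (-1))]))
      (st0.1, ([] : List String))).2

-- ===== PORT B =====
def stepInsidePath_alt (path : String) : List String :=
  let parts := splitAll path
  if parts.length ≤ 1 then [path]
  else
    let dr : String × List String :=
      if PySem.Str.endswith parts.headI ":" then (parts.headI, parts.tail)
      else ("", parts)
    (List.range dr.2.length).map (fun i => dr.1 ++ PySem.Str.join "/" (dr.2.take (i + 1)))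

-- ===== PRECONDITION & SPEC =====
def Spec_stepInsidePath (path : String) (out : List String) : Prop := out = stepInsidePath_alt path
instance (path : String) (out : List String) : Decidable (Spec_stepInsidePath path out) := by unfold Spec_stepInsidePath; infer_instance

-- ===== CLAIM (what is proved, stated in full; the proofs are below) =====
def Claim_equal_stepInsidePath : Prop := ∀ (path : String), Dom_stepInsidePath path → Spec_stepInsidePath path (stepInsidePath path)

-- ===== LEMMAS AND PROOFS =====
theorem strSliceTrim (s : String) : PySem.Str.slice (s ++ "/") none (some (-1)) = s := by
  apply String.toList_inj.mp
  simp [PySem.List.slice_to_neg_one]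

theorem strJoin_singleton (x : String) : PySem.Str.join "/" [x] = x := by
  apply String.toList_inj.mp
  simp [PySem.Str.toList_join]

theorem strJoin_cons_ne_nil (x : String) (l : List String) (h : l ≠ []) :
    PySem.Str.join "/" (x :: l) = x ++ "/" ++ PySem.Str.join "/" l := by
  apply String.toList_inj.mp
  obtain ⟨y, ys, rfl⟩ := List.exists_cons_of_ne_nil h
  simp [PySem.Str.toList_join, PySem.Chars.join_cons_cons]

theorem loopA_eq (rest : List String) (acc : String) (out : List String) :
    (rest.foldl (fun (st : String × List String) fol =>
        (st.1 ++ fol ++ "/", st.2 ++ [PySem.Str.slice (st.1 ++ fol ++ "/") none (some (-1))]))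
      (acc, out)).2
    = out ++ (List.range rest.length).map
        (fun i => acc ++ PySem.Str.join "/" (rest.take (i + 1))) := by
  induction rest generalizing acc out with
  | nil => simp
  | cons fol rest' ih =>
    simp only [List.foldl_cons, List.length_cons, List.range_succ_eq_map, List.map_cons,
      List.map_map]
    rw [ih, strSliceTrim]
    have h0 : (fol :: rest').take (0 + 1) = [fol] := by simp
    rw [h0, strJoin_singleton]
    have hmap : ∀ i ∈ List.range rest'.length,
        acc ++ fol ++ "/" ++ PySem.Str.join "/" (rest'.take (i + 1))
        = acc ++ PySem.Str.join "/" ((fol :: rest').take (Nat.succ i + 1)) := by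
      intro i hi
      rw [List.mem_range] at hi
      have hne : rest'.take (i + 1) ≠ [] := by
        have : rest' ≠ [] := by
          intro h; subst h; simp at hi
        obtain ⟨y, ys, rfl⟩ := List.exists_cons_of_ne_nil this
        simp
      have : (fol :: rest').take (Nat.succ i + 1) = fol :: rest'.take (i + 1) := by simp
      rw [this, strJoin_cons_ne_nil _ _ hne, ← String.append_assoc, ← String.append_assoc]
    rw [List.map_congr_left (fun i hi => (hmap i hi))]
    simp [Function.comp]

theorem stepInsidePath_eq_alt (path : String) : stepInsidePath path = stepInsidePath_alt path := by
  unfold stepInsidePath stepInsidePath_alt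
  generalize splitAll path = p
  by_cases h1 : p.length <= 1
  · rw [if_pos h1, if_pos h1]
  · rw [if_neg h1, if_neg h1]
    dsimp only
    by_cases h2 : PySem.Str.endswith p.headI ":" = true
    · rw [if_pos h2]
      exact loopA_eq _ _ _
    · rw [if_neg h2]
      exact loopA_eq _ _ _

-- ===== VERDICT (by name: the statement is the Claim_ definition above) =====
theorem stepInsidePath_spec : Claim_equal_stepInsidePath := by
  intro path _
  unfold Spec_stepInsidePath
  exact stepInsidePath_eq_alt path
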